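-- pv_equiv track=rewrite | github.com/jeremyfriedel/GraphPie | calculations.py | Intvarients
-- ===== SOURCE A (Python) =====
-- def Intvarients(n):
--     # just fills a list with all integers up to size of n
--     # 1,2,3,4...
--     intg = list(range(1, n))
--     evens, odds = [], []
--     # uses list of integers to find odds and evens
--     for i in intg:
--         # if its divisible by 2 its even
--         if i % 2 == 0:
--             evens.append(i)
--         # if not its odd
--         if i % 2 != 0:
--             odds.append(i)
--
--     # return everything, is separated out by other functions as needed
--     return intg, evens, odds
-- ===== SOURCE B (Python) =====
-- def Intvarients(n):
--     # closed-form strided ranges instead of a branching pass over intg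
--     return list(range(1, n)), list(range(2, n, 2)), list(range(1, n, 2))
-- ===== Notes on version B (the rewrite author's own statement) =====
-- stated objective: simpler
-- what changed: Replaces the parity-testing loop with three closed-form strided range enumerations (range(2,n,2) for evens, range(1,n,2) for odds).
import Mathlib
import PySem

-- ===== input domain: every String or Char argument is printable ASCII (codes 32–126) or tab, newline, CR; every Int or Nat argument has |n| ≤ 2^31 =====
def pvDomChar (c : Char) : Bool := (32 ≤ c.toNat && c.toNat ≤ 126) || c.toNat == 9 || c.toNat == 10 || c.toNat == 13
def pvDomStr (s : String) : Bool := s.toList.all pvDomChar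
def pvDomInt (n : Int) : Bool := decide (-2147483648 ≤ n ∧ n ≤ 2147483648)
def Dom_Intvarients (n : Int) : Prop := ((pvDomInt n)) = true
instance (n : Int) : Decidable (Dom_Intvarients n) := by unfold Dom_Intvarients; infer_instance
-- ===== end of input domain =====

-- B builds evens/odds with closed-form strided ranges instead of A's parity-testing loop (simpler).

-- ===== PORT A =====
def Intvarients (n : Int) : List Int × List Int × List Int :=
  let intg := PySem.List.pyRange 1 n 1
  let eo := intg.foldl (fun (p : List Int × List Int) i =>
      let p := if PySem.Int.mod i 2 == 0 then (p.1 ++ [i], p.2) else p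
      if PySem.Int.mod i 2 != 0 then (p.1, p.2 ++ [i]) else p) ([], [])
  (intg, eo.1, eo.2)

-- ===== PORT B =====
def Intvarients_alt (n : Int) : List Int × List Int × List Int :=
  (PySem.List.pyRange 1 n 1, PySem.List.pyRange 2 n 2, PySem.List.pyRange 1 n 2)

-- ===== PRECONDITION & SPEC =====
def Spec_Intvarients (n : Int) (out : List Int × List Int × List Int) : Prop := out = Intvarients_alt n
instance (n : Int) (out : List Int × List Int × List Int) : Decidable (Spec_Intvarients n out) := by unfold Spec_Intvarients; infer_instance

-- ===== CLAIM (what is proved, stated in full; the proofs are below) =====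
def Claim_equal_Intvarients : Prop := ∀ (n : Int), Dom_Intvarients n → Spec_Intvarients n (Intvarients n)

-- ===== LEMMAS AND PROOFS =====

theorem pymod_two (i : Int) : PySem.Int.mod i 2 = i % 2 := by
  simp [PySem.Int.mod]
  rw [Int.fmod_eq_emod]
  norm_num

theorem loop_eq (l : List Int) (ev od : List Int) :
    l.foldl (fun (p : List Int × List Int) i =>
      let p := if i % 2 == 0 then (p.1 ++ [i], p.2) else p
      if i % 2 != 0 then (p.1, p.2 ++ [i]) else p) (ev, od)
    = (ev ++ l.filter (fun i => i % 2 == 0), od ++ l.filter (fun i => i % 2 != 0)) := by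
  induction l generalizing ev od with
  | nil => simp
  | cons a l ih =>
    by_cases h : a % 2 = 0
    · have h1 : ((a % 2 == 0) : Bool) = true := by simp [h]
      have h2 : ((a % 2 != 0) : Bool) = false := by simp [h]
      simp only [List.foldl_cons, h1, h2, Bool.false_eq_true, if_true,
        if_false]
      rw [ih]
      simp [h1, h2]
    · have h1 : ((a % 2 == 0) : Bool) = false := by simp [h]
      have h2 : ((a % 2 != 0) : Bool) = true := by simp [h]
      simp only [List.foldl_cons, h1, h2, Bool.false_eq_true, if_true,
        if_false]
      rw [ih]
      simp [h1, h2]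

theorem pyRange_two_nil (a b : Int) (h : b <= a) : PySem.List.pyRange a b 2 = [] := by
  rw [PySem.List.pyRange_of_pos a b (by norm_num)]
  simp [show ¬ a < b by omega]

theorem pyRange_two_cons (a b : Int) (h : a < b) :
    PySem.List.pyRange a b 2 = a :: PySem.List.pyRange (a + 2) b 2 := by
  rw [PySem.List.pyRange_of_pos a b (by norm_num),
      PySem.List.pyRange_of_pos (a + 2) b (by norm_num)]
  rw [if_pos h]
  have hc : ((b - a + 2 - 1) / 2).toNat
      = (if a + 2 < b then ((b - (a + 2) + 2 - 1) / 2).toNat else 0) + 1 := by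
    split_ifs <;> omega
  rw [hc, List.range_succ_eq_map]
  simp only [List.map_cons, List.map_map]
  congr 1
  · simp
  · apply List.map_congr_left
    intro k _
    simp only [Function.comp_apply, Nat.succ_eq_add_one]
    push_cast
    ring

theorem filter_even (a b : Int) (ha : a % 2 = 0) :
    (PySem.List.pyRange a b 1).filter (fun i => i % 2 == 0) = PySem.List.pyRange a b 2 := by
  by_cases h : a < b
  · rw [PySem.List.pyRange_one_cons h, pyRange_two_cons a b h, List.filter_cons]
    have he : ((a % 2 == 0) : Bool) = true := by simp [ha]
    rw [he, if_pos rfl]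
    by_cases h2 : a + 1 < b
    · rw [PySem.List.pyRange_one_cons h2, List.filter_cons]
      have ho : (((a + 1) % 2 == 0) : Bool) = false := by simp; omega
      rw [ho, if_neg (by simp), show a + 1 + 1 = a + 2 by ring,
          filter_even (a + 2) b (by omega)]
    · rw [PySem.List.pyRange_one_eq_nil (by omega), pyRange_two_nil (a + 2) b (by omega)]
      rfl
  · rw [PySem.List.pyRange_one_eq_nil (by omega), pyRange_two_nil a b (by omega)]
    rfl
termination_by (b - a).toNat
decreasing_by omega

theorem filter_odd (a b : Int) (ha : a % 2 = 1) :
    (PySem.List.pyRange a b 1).filter (fun i => i % 2 != 0) = PySem.List.pyRange a b 2 := by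
  by_cases h : a < b
  · rw [PySem.List.pyRange_one_cons h, pyRange_two_cons a b h, List.filter_cons]
    have he : ((a % 2 != 0) : Bool) = true := by simp; omega
    rw [he, if_pos rfl]
    by_cases h2 : a + 1 < b
    · rw [PySem.List.pyRange_one_cons h2, List.filter_cons]
      have ho : (((a + 1) % 2 != 0) : Bool) = false := by simp; omega
      rw [ho, if_neg (by simp), show a + 1 + 1 = a + 2 by ring,
          filter_odd (a + 2) b (by omega)]
    · rw [PySem.List.pyRange_one_eq_nil (by omega), pyRange_two_nil (a + 2) b (by omega)]
      rfl
  · rw [PySem.List.pyRange_one_eq_nil (by omega), pyRange_two_nil a b (by omega)]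
    rfl
termination_by (b - a).toNat
decreasing_by omega

theorem filter_even_shift (b : Int) :
    (PySem.List.pyRange 1 b 1).filter (fun i => i % 2 == 0) = PySem.List.pyRange 2 b 2 := by
  by_cases h : 1 < b
  · rw [PySem.List.pyRange_one_cons h, List.filter_cons]
    have h1 : (((1 : Int) % 2 == 0) : Bool) = false := by decide
    rw [h1, if_neg (by simp)]
    exact filter_even 2 b (by norm_num)
  · rw [PySem.List.pyRange_one_eq_nil (by omega), pyRange_two_nil 2 b (by omega)]
    rfl

-- ===== VERDICT (by name: the statement is the Claim_ definition above) =====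
theorem Intvarients_spec : Claim_equal_Intvarients := by
  intro n _
  unfold Spec_Intvarients Intvarients Intvarients_alt
  simp only [pymod_two]
  simp only [loop_eq, List.nil_append]
  rw [filter_even_shift, filter_odd 1 n (by norm_num)]
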